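-- pv_equiv track=rewrite | github.com/wuc6602fx/ws | is17/qp.py | solve
-- ===== SOURCE A (Python) =====
-- K = 10   #Board size
--
-- P = 10   #Queen force
--
-- def under_attack(col,queens,n):
--     left = right = col
--     for r,c in queens[::-1]:    #reverse queens
--         left, right = left-1, right+1   #left, right be reduced gradually
--         if n-r>P: #Determine Whether out of queen force
--             return False
--         if c in (left, col, right): #Because we use top-bottom way, so we only need to detect upper position
--             return True
--     return False
--
-- def solve(n):
--     if n == 0:
--         return[[]]
--     smaller_solutions = solve(n-1)  #To solve K,We should solve every case smaller then K
--     return[solution+[(n,i+1)]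
--             for i in range(K)
--                 for solution in smaller_solutions
--                 if not under_attack(i+1, solution, n)]#parameter(col[1:i+1], each smaller_solutions, board size now)
-- ===== SOURCE B (Python) =====
-- K = 10   #Board size
--
-- P = 10   #Queen force
--
-- def under_attack(col,queens,n):
--     left = right = col
--     for r,c in queens[::-1]:    #reverse queens
--         left, right = left-1, right+1   #left, right be reduced gradually
--         if n-r>P: #Determine Whether out of queen force
--             return False
--         if c in (left, col, right): #Because we use top-bottom way, so we only need to detect upper position
--             return True
--     return False
--
-- def solve(n):
--     # bottom-up: build the solution lists row by row instead of recursing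
--     solutions = [[]]
--     for row in range(1, n + 1):
--         new = []
--         for i in range(K):
--             for sol in solutions:
--                 if not under_attack(i + 1, sol, row):
--                     new.append(sol + [(row, i + 1)])
--         solutions = new
--     return solutions
-- ===== Notes on version B (the rewrite author's own statement) =====
-- stated objective: alternative
-- what changed: Replaces top-down recursion (solve(n) calls solve(n-1) and extends via a nested comprehension) with an explicit bottom-up loop over rows 1..n that rebuilds the solution list with nested accumulator loops.
import Mathlib
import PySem

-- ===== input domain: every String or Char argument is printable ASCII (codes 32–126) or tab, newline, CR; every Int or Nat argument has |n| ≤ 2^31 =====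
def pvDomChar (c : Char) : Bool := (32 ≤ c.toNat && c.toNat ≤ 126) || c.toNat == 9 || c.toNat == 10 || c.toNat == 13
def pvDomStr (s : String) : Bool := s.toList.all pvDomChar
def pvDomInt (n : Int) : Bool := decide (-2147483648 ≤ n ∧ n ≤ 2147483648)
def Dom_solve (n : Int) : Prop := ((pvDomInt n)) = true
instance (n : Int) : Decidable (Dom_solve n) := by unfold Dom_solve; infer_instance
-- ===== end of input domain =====

-- B replaces A's top-down recursion by an explicit bottom-up loop over rows (alternative
-- decomposition, same cost); under_attack is kept verbatim and shared by both ports.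
-- A raises RecursionError for n < 0; Pre_solve excludes those inputs.

-- ===== PORT A =====
def pvK : Int := 10   -- K = 10, board size
def pvP : Int := 10   -- P = 10, queen force

-- loop of under_attack over queens[::-1]; carries (left, right) state
def uaLoop (col n : Int) : Int → Int → List (Int × Int) → Bool
  | _, _, [] => false
  | left, right, (r, c) :: rest =>
      let left' := left - 1
      let right' := right + 1
      if n - r > pvP then false
      else if c = left' || c = col || c = right' then true
      else uaLoop col n left' right' rest

def under_attack (col : Int) (queens : List (Int × Int)) (n : Int) : Bool :=
  -- queens[::-1] = queens.reverse (PySem.List.slice?_none_none_neg_one)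
  uaLoop col n col col queens.reverse

-- A's recursion, on the fuel n.toNat (for n < 0 A raises RecursionError: outside Pre_solve)
def solveGo : Nat → List (List (Int × Int))
  | 0 => [[]]
  | Nat.succ k =>
      let n : Int := (k : Int) + 1
      let smaller_solutions := solveGo k
      (PySem.List.pyRange 0 pvK 1).flatMap (fun i =>
        (smaller_solutions.filter (fun solution => !under_attack (i + 1) solution n)).map
          (fun solution => solution ++ [(n, i + 1)]))

def solve (n : Int) : List (List (Int × Int)) := solveGo n.toNat

-- ===== PORT B =====
def solve_alt (n : Int) : List (List (Int × Int)) :=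
  (PySem.List.pyRange 1 (n + 1) 1).foldl
    (fun solutions row =>
      (PySem.List.pyRange 0 pvK 1).foldl
        (fun new i =>
          solutions.foldl
            (fun new sol =>
              if !under_attack (i + 1) sol row then new ++ [sol ++ [(row, i + 1)]] else new)
            new)
        [])
    [[]]

-- ===== PRECONDITION & SPEC =====
-- Pre_ excludes n < 0, on which A recurses without reaching the base case and raises RecursionError.
def Pre_solve (n : Int) : Prop := 0 ≤ n
instance (n : Int) : Decidable (Pre_solve n) := by unfold Pre_solve; infer_instance
def pvWitness_solve : Int := (4)

def Spec_solve (n : Int) (out : List (List (Int × Int))) : Prop := out = solve_alt n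
instance (n : Int) (out : List (List (Int × Int))) : Decidable (Spec_solve n out) := by unfold Spec_solve; infer_instance

-- ===== CLAIM (what is proved, stated in full; the proofs are below) =====
def Claim_equal_solve : Prop := ∀ (n : Int), Dom_solve n → Pre_solve n → Spec_solve n (solve n)

-- ===== LEMMAS AND PROOFS =====

-- B's inner two loops over one row equal A's comprehension over that row
theorem step_eq (solutions : List (List (Int × Int))) (row : Int) :
    (PySem.List.pyRange 0 pvK 1).foldl
      (fun new i =>
        solutions.foldl
          (fun new sol =>
            if !under_attack (i + 1) sol row then new ++ [sol ++ [(row, i + 1)]] else new)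
          new)
      []
    = (PySem.List.pyRange 0 pvK 1).flatMap (fun i =>
        (solutions.filter (fun sol => !under_attack (i + 1) sol row)).map
          (fun sol => sol ++ [(row, i + 1)])) := by
  have h : ∀ (new : List (List (Int × Int))) (i : Int),
      solutions.foldl
        (fun new sol =>
          if !under_attack (i + 1) sol row then new ++ [sol ++ [(row, i + 1)]] else new)
        new
      = new ++ (solutions.filter (fun sol => !under_attack (i + 1) sol row)).map
          (fun sol => sol ++ [(row, i + 1)]) := by
    intro new i
    exact PySem.List.foldl_append_if _ _ _ _
  calc (PySem.List.pyRange 0 pvK 1).foldl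
        (fun new i =>
          solutions.foldl
            (fun new sol =>
              if !under_attack (i + 1) sol row then new ++ [sol ++ [(row, i + 1)]] else new)
            new)
        []
      = (PySem.List.pyRange 0 pvK 1).foldl
          (fun new i => new ++ (solutions.filter (fun sol => !under_attack (i + 1) sol row)).map
            (fun sol => sol ++ [(row, i + 1)])) [] := by
        congr 1; funext new i; exact h new i
    _ = _ := by
        rw [PySem.List.foldl_append_eq_flatMap]
        simp

theorem alt_nat (k : Nat) : solve_alt (k : Int) = solveGo k := by
  induction k with
  | zero =>
      simp [solve_alt, solveGo]
  | succ k ih =>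
      unfold solve_alt
      have hcast : ((k + 1 : Nat) : Int) + 1 = ((k : Int) + 1) + 1 := by push_cast; ring
      rw [hcast,
        PySem.List.pyRange_one_succ_right (by omega : (1:Int) ≤ (k : Int) + 1),
        List.foldl_append]
      unfold solve_alt at ih
      rw [ih, List.foldl_cons, List.foldl_nil, step_eq]
      rfl

-- ===== VERDICT (by name: the statement is the Claim_ definition above) =====
theorem solve_spec : Claim_equal_solve := by
  intro n _ hpre
  unfold Spec_solve solve
  have : ((n.toNat : Int)) = n := Int.toNat_of_nonneg hpre
  rw [← alt_nat n.toNat, this]
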